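-- pv_equiv track=rewrite | github.com/seopchan/CodingTest | 백준/Silver/9465. 스티커/스티커.py | getMaxVal
-- ===== SOURCE A (Python) =====
-- def getMaxVal(n, stickers):
--     if n == 1:
--         return max(stickers[0][0], stickers[1][0])
--
--     # dp 배열을 0으로 초기화
--     dp = [[0] * n for _ in range(2)]
--
--     dp[0][0] = stickers[0][0]
--     dp[1][0] = stickers[1][0]
--
--     dp[0][1] = stickers[0][1] + dp[1][0]
--     dp[1][1] = stickers[1][1] + dp[0][0]
--
--     for i in range(2, n):
--         dp[0][i] = stickers[0][i] + max(dp[1][i - 1], dp[1][i - 2])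
--         dp[1][i] = stickers[1][i] + max(dp[0][i - 1], dp[0][i - 2])
--
--     return max(dp[0][n-1], dp[1][n-1])
-- ===== SOURCE B (Python) =====
-- def getMaxVal(n, stickers):
--     if n == 1:
--         return max(stickers[0][0], stickers[1][0])
--
--     memo = {}
--
--     def f(row, i):
--         # best total value of a selection in columns 0..i whose last pick is (row, i)
--         if (row, i) in memo:
--             return memo[(row, i)]
--         if i == 0:
--             v = stickers[row][0]
--         elif i == 1:
--             v = stickers[row][1] + stickers[1 - row][0]
--         else:
--             v = stickers[row][i] + max(f(1 - row, i - 1), f(1 - row, i - 2))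
--         memo[(row, i)] = v
--         return v
--
--     return max(f(0, n - 1), f(1, n - 1))
-- ===== Notes on version B (the rewrite author's own statement) =====
-- stated objective: alternative
-- what changed: Replaces A's bottom-up fill of a 2xn dp table with top-down memoized recursion f(row, i) on the column index, with no dp arrays and no left-to-right loop.
import Mathlib
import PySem

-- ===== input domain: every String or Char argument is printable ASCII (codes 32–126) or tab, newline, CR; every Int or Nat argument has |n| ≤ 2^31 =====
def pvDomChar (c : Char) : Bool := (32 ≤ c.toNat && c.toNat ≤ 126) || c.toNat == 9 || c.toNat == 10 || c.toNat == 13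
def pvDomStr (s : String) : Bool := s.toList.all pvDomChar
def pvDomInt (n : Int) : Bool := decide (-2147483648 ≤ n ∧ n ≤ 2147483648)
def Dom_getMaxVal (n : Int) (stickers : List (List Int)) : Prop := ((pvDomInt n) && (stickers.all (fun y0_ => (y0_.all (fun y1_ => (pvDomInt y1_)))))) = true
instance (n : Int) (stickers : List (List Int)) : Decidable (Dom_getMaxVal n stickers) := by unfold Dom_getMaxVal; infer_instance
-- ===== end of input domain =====

-- B replaces A's bottom-up fill of a 2xn dp table by top-down memoized recursion
-- on the column index (an alternative decomposition; the memo is a pure cache).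


-- ===== PORT A =====
-- literal transliteration of A: dp = two length-n lists filled in place, loop i in range(2, n)
def getMaxVal (n : Int) (stickers : List (List Int)) : Int :=
  let s0 := stickers.getD 0 []
  let s1 := stickers.getD 1 []
  if n == 1 then max (s0.getD 0 0) (s1.getD 0 0)
  else
    let dp0 := List.replicate n.toNat (0 : Int)
    let dp1 := List.replicate n.toNat (0 : Int)
    let dp0 := dp0.set 0 (s0.getD 0 0)
    let dp1 := dp1.set 0 (s1.getD 0 0)
    let dp0 := dp0.set 1 (s0.getD 1 0 + dp1.getD 0 0)
    let dp1 := dp1.set 1 (s1.getD 1 0 + dp0.getD 0 0)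
    let p := (PySem.List.pyRange 2 n 1).foldl
      (fun (p : List Int × List Int) (i : Int) =>
        let d0 := p.1.set i.toNat (s0.getD i.toNat 0 + max (p.2.getD (i.toNat - 1) 0) (p.2.getD (i.toNat - 2) 0))
        let d1 := p.2.set i.toNat (s1.getD i.toNat 0 + max (d0.getD (i.toNat - 1) 0) (d0.getD (i.toNat - 2) 0))
        (d0, d1)) (dp0, dp1)
    max (p.1.getD (n.toNat - 1) 0) (p.2.getD (n.toNat - 1) 0)

-- ===== PORT B =====
-- B's helper f(row, i): the memo dict in Source B is a pure cache (it only ever stores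
-- the value this recursion computes), so the port is the recursion itself.
def pvF (s0 s1 : List Int) (row : Nat) (i : Nat) : Int :=
  match i with
  | 0 => (if row == 0 then s0 else s1).getD 0 0
  | 1 => (if row == 0 then s0 else s1).getD 1 0 + (if row == 0 then s1 else s0).getD 0 0
  | (j + 2) => (if row == 0 then s0 else s1).getD (j + 2) 0
      + max (pvF s0 s1 (1 - row) (j + 1)) (pvF s0 s1 (1 - row) j)

-- literal transliteration of B: answer = max(f(0, n-1), f(1, n-1))
def getMaxVal_alt (n : Int) (stickers : List (List Int)) : Int :=
  if n == 1 then max ((stickers.getD 0 []).getD 0 0) ((stickers.getD 1 []).getD 0 0)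
  else
    max (pvF (stickers.getD 0 []) (stickers.getD 1 []) 0 (n.toNat - 1))
        (pvF (stickers.getD 0 []) (stickers.getD 1 []) 1 (n.toNat - 1))

-- ===== PRECONDITION & SPEC =====
-- Pre_ excludes exactly the inputs where Python A raises IndexError:
-- n < 1, fewer than two sticker rows, or a first/second row shorter than n.
def Pre_getMaxVal (n : Int) (stickers : List (List Int)) : Prop :=
  1 ≤ n ∧ 2 ≤ stickers.length ∧ n ≤ (stickers.getD 0 []).length ∧ n ≤ (stickers.getD 1 []).length
instance (n : Int) (stickers : List (List Int)) : Decidable (Pre_getMaxVal n stickers) := by unfold Pre_getMaxVal; infer_instance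

def pvWitness_getMaxVal : Int × List (List Int) := (3, [[1, 2, 3], [4, 5, 6]])

def Spec_getMaxVal (n : Int) (stickers : List (List Int)) (out : Int) : Prop := out = getMaxVal_alt n stickers
instance (n : Int) (stickers : List (List Int)) (out : Int) : Decidable (Spec_getMaxVal n stickers out) := by unfold Spec_getMaxVal; infer_instance

-- ===== CLAIM (what is proved, stated in full; the proofs are below) =====
def Claim_equal_getMaxVal : Prop := ∀ (n : Int) (stickers : List (List Int)), Dom_getMaxVal n stickers → Pre_getMaxVal n stickers → Spec_getMaxVal n stickers (getMaxVal n stickers)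

-- ===== LEMMAS AND PROOFS =====

-- the common recurrence: pvG s0 s1 j = (best ending in row 0 at column j, best ending in row 1 at column j)
def pvG (s0 s1 : List Int) : Nat → Int × Int
  | 0 => (s0.getD 0 0, s1.getD 0 0)
  | 1 => (s0.getD 1 0 + s1.getD 0 0, s1.getD 1 0 + s0.getD 0 0)
  | (j + 2) => (s0.getD (j + 2) 0 + max (pvG s0 s1 (j + 1)).2 (pvG s0 s1 j).2,
                s1.getD (j + 2) 0 + max (pvG s0 s1 (j + 1)).1 (pvG s0 s1 j).1)

-- B's recursion computes pvG
theorem pvF_eq (s0 s1 : List Int) (i : Nat) :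
    pvF s0 s1 0 i = (pvG s0 s1 i).1 ∧ pvF s0 s1 1 i = (pvG s0 s1 i).2 := by
  induction i using Nat.strong_induction_on with
  | _ i ih =>
    match i with
    | 0 => simp [pvF, pvG]
    | 1 => simp [pvF, pvG]
    | (j + 2) =>
      have h1 := ih (j + 1) (by omega)
      have h2 := ih j (by omega)
      constructor <;> simp [pvF, pvG, h1.1, h1.2, h2.1, h2.2]

-- invariant for A's fold: dp lists have length N and hold pvG on columns < m
theorem pvA_fold (s0 s1 : List Int) (N : Nat) (hN : 2 ≤ N) (k : Nat) (hk : k + 2 ≤ N) :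
    let init0 := (((List.replicate N (0 : Int)).set 0 (s0.getD 0 0)).set 1 (s0.getD 1 0 + ((List.replicate N (0 : Int)).set 0 (s1.getD 0 0)).getD 0 0))
    let init1 := (((List.replicate N (0 : Int)).set 0 (s1.getD 0 0)).set 1 (s1.getD 1 0 + init0.getD 0 0))
    let p := (PySem.List.pyRange 2 ((k : Int) + 2) 1).foldl
      (fun (p : List Int × List Int) (i : Int) =>
        let d0 := p.1.set i.toNat (s0.getD i.toNat 0 + max (p.2.getD (i.toNat - 1) 0) (p.2.getD (i.toNat - 2) 0))
        let d1 := p.2.set i.toNat (s1.getD i.toNat 0 + max (d0.getD (i.toNat - 1) 0) (d0.getD (i.toNat - 2) 0))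
        (d0, d1)) (init0, init1)
    p.1.length = N ∧ p.2.length = N ∧
      ∀ j, j < k + 2 → p.1.getD j 0 = (pvG s0 s1 j).1 ∧ p.2.getD j 0 = (pvG s0 s1 j).2 := by
  induction k with
  | zero =>
    intro init0 init1 p
    rw [show p = (init0, init1) by
      simp only [p]; rw [PySem.List.pyRange_one_eq_nil (by norm_num)]; rfl]
    refine ⟨by simp [init0], by simp [init1, init0], ?_⟩
    intro j hj
    interval_cases j <;>
      simp [init0, init1, pvG, List.getD, show 0 < N by omega, show 1 < N by omega]
  | succ k ih =>
    intro init0 init1 p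
    have hk' : k + 2 ≤ N := by omega
    obtain ⟨hl0, hl1, hv⟩ := ih hk'
    set q := (PySem.List.pyRange 2 ((k : Int) + 2) 1).foldl
      (fun (p : List Int × List Int) (i : Int) =>
        let d0 := p.1.set i.toNat (s0.getD i.toNat 0 + max (p.2.getD (i.toNat - 1) 0) (p.2.getD (i.toNat - 2) 0))
        let d1 := p.2.set i.toNat (s1.getD i.toNat 0 + max (d0.getD (i.toNat - 1) 0) (d0.getD (i.toNat - 2) 0))
        (d0, d1)) (init0, init1) with hq
    have hstep : p = ((q.1.set (k + 2) (s0.getD (k + 2) 0 + max (q.2.getD (k + 1) 0) (q.2.getD k 0))),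
        ((q.2.set (k + 2) (s1.getD (k + 2) 0 + max ((q.1.set (k + 2) (s0.getD (k + 2) 0 + max (q.2.getD (k + 1) 0) (q.2.getD k 0))).getD (k + 1) 0) ((q.1.set (k + 2) (s0.getD (k + 2) 0 + max (q.2.getD (k + 1) 0) (q.2.getD k 0))).getD k 0))))) := by
      simp only [p]
      rw [show (((k + 1 : Nat) : Int) + 2) = ((k : Int) + 2) + 1 by push_cast; ring,
          PySem.List.pyRange_one_succ_right (by omega), List.foldl_append, ← hq]
      simp only [List.foldl_cons, List.foldl_nil]
      have ht : ((k : Int) + 2).toNat = k + 2 := by omega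
      rw [ht]
      have h1 : k + 2 - 1 = k + 1 := by omega
      have h2 : k + 2 - 2 = k := by omega
      rw [h1, h2]
    -- getD of a set list at an index below the set point
    have hset_ne : ∀ (xs : List Int) (v : Int) (j : Nat), j ≠ k + 2 →
        (xs.set (k + 2) v).getD j 0 = xs.getD j 0 := by
      intro xs v j hj
      simp [List.getD, (Ne.symm hj)]
    have hkN : k + 2 < N := by omega
    have hd0 : ∀ j, j < k + 3 →
        (q.1.set (k + 2) (s0.getD (k + 2) 0 + max (q.2.getD (k + 1) 0) (q.2.getD k 0))).getD j 0
          = (pvG s0 s1 j).1 := by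
      intro j hj
      by_cases hje : j = k + 2
      · subst hje
        rw [List.getD, List.getElem?_set_self (by rw [hl0]; omega), Option.getD_some,
            (hv (k + 1) (by omega)).2, (hv k (by omega)).2]
        rfl
      · rw [hset_ne _ _ _ hje]; exact (hv j (by omega)).1
    refine ⟨?_, ?_, ?_⟩
    · rw [hstep]; simpa using hl0
    · rw [hstep]; simpa using hl1
    · intro j hj
      rw [hstep]
      constructor
      · exact hd0 j hj
      · by_cases hje : j = k + 2
        · subst hje
          rw [List.getD, List.getElem?_set_self (by rw [hl1]; omega), Option.getD_some,
              hd0 (k + 1) (by omega), hd0 k (by omega)]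
          rfl
        · rw [hset_ne _ _ _ hje]; exact (hv j (by omega)).2

-- ===== VERDICT (by name: the statement is the Claim_ definition above) =====
theorem getMaxVal_spec : Claim_equal_getMaxVal := by
  intro n stickers _ hpre
  obtain ⟨hn1, _hrows, h0, h1⟩ := hpre
  unfold Spec_getMaxVal getMaxVal getMaxVal_alt
  by_cases hn : n = 1
  · simp [hn]
  · have hn2 : 2 ≤ n := by omega
    have hne : (n == 1) = false := by simp [hn]
    simp only [hne, Bool.false_eq_true, if_false]
    set s0 := stickers.getD 0 [] with hs0
    set s1 := stickers.getD 1 [] with hs1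
    set N := n.toNat with hNdef
    have hN : 2 ≤ N := by omega
    have hcast : n = ((N - 2 : Nat) : Int) + 2 := by omega
    have hA := pvA_fold s0 s1 N hN (N - 2) (by omega)
    simp only at hA
    obtain ⟨_, _, hv⟩ := hA
    have hF := pvF_eq s0 s1 (N - 1)
    rw [hcast, hv (N - 1) (by omega) |>.1, hv (N - 1) (by omega) |>.2, hF.1, hF.2]
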